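-- pv_equiv track=rewrite | github.com/MartaHentosh/Algo_labs | lab5_3.py | build_tribes_graph
-- ===== SOURCE A (Python) =====
-- def build_tribes_graph(pairs):
--     tribes = [set(pairs[0])]
--     for pair in pairs[1:]:
--         merged = False
--         for tribe in tribes:
--             if any(person in tribe for person in pair):
--                 tribe.update(pair)
--                 merged = True
--                 break
--         if not merged:
--             tribes.append(set(pair))
--     return tribes
-- ===== SOURCE B (Python) =====
-- def build_tribes_graph(pairs):
--     # One pass with a person -> earliest-tribe-index map instead of scanning all tribes per pair.
--     tribes = [set(pairs[0])]
--     first = {p: 0 for p in pairs[0]}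
--     for pair in pairs[1:]:
--         hits = [first[p] for p in pair if p in first]
--         if hits:
--             i = min(hits)
--             tribes[i].update(pair)
--         else:
--             i = len(tribes)
--             tribes.append(set(pair))
--         for p in pair:
--             first[p] = i
--     return tribes
-- ===== Notes on version B (the rewrite author's own statement) =====
-- stated objective: alternative
-- what changed: Replaces the per-pair scan over all tribes with a single pass keeping a dict mapping each person to the earliest tribe index containing them, so the first matching tribe is found by dict lookups instead of rescanning the tribe list.
import Mathlib
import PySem

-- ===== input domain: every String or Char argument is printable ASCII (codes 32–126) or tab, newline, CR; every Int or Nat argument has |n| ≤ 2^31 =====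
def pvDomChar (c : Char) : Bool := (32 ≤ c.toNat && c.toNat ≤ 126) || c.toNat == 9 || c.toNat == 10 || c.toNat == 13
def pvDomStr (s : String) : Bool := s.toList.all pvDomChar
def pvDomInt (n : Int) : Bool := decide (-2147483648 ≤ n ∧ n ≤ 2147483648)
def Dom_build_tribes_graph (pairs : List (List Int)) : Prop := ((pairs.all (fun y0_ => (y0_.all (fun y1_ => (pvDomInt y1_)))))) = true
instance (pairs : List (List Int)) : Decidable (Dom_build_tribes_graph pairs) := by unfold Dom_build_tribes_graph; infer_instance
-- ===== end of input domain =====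

-- B replaces A's per-pair scan over all tribes with a single pass keeping a person → earliest-tribe-index map (alternative algorithm).

-- ===== PORT A =====
-- 'any(person in tribe for person in pair)'
def pvAnyIn (pair : List Int) (t : PySem.Set Int) : Bool :=
  pair.any (fun person => PySem.Set.contains t person)

-- the inner 'for tribe in tribes: … break' loop: returns the updated tribes list and the 'merged' flag
def pvAMerge (pair : List Int) : List (PySem.Set Int) → List (PySem.Set Int) × Bool
  | [] => ([], false)
  | t :: ts =>
    if pvAnyIn pair t then (PySem.Set.update t pair :: ts, true)
    else
      let r := pvAMerge pair ts
      (t :: r.1, r.2)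

-- Python raises IndexError at 'pairs[0]' when pairs = []; that input is excluded by Pre_ below.
def build_tribes_graph (pairs : List (List Int)) : List (List Int) :=
  match pairs with
  | [] => []
  | p0 :: rest =>
    rest.foldl (fun tribes pair =>
      let r := pvAMerge pair tribes
      if r.2 then r.1 else r.1 ++ [PySem.Set.ofList pair]) [PySem.Set.ofList p0]

-- ===== PORT B =====
-- one step of Source B's loop: state = (tribes, first); 'tribes[i]' is read with getD (i is always in range)
def pvBStep (st : List (PySem.Set Int) × PySem.Dict Int Nat) (pair : List Int) :
    List (PySem.Set Int) × PySem.Dict Int Nat :=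
  let hits := (pair.filter (fun p => st.2.contains p)).map (fun p => st.2.getD p 0)
  let (tribes', i) :=
    match hits.min? with
    | some i => (st.1.set i (PySem.Set.update (st.1.getD i []) pair), i)
    | none => (st.1 ++ [PySem.Set.ofList pair], st.1.length)
  (tribes', pair.foldl (fun d p => d.insert p i) st.2)

def build_tribes_graph_alt (pairs : List (List Int)) : List (List Int) :=
  match pairs with
  | [] => []
  | p0 :: rest =>
    (rest.foldl pvBStep
      ([PySem.Set.ofList p0], p0.foldl (fun d p => d.insert p (0 : Nat)) PySem.Dict.empty)).1

-- ===== PRECONDITION & SPEC =====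
-- Pre_ excludes only the empty list, on which A (and B) raise IndexError at pairs[0].
def Pre_build_tribes_graph (pairs : List (List Int)) : Prop := pairs ≠ []
instance (pairs : List (List Int)) : Decidable (Pre_build_tribes_graph pairs) := by unfold Pre_build_tribes_graph; infer_instance
def pvWitness_build_tribes_graph : List (List Int) := [[1, 2], [2, 3], [4, 5]]

def Spec_build_tribes_graph (pairs : List (List Int)) (out : List (List Int)) : Prop := out = build_tribes_graph_alt pairs
instance (pairs : List (List Int)) (out : List (List Int)) : Decidable (Spec_build_tribes_graph pairs out) := by unfold Spec_build_tribes_graph; infer_instance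

-- ===== CLAIM (what is proved, stated in full; the proofs are below) =====
def Claim_equal_build_tribes_graph : Prop := ∀ (pairs : List (List Int)), Dom_build_tribes_graph pairs → Pre_build_tribes_graph pairs → Spec_build_tribes_graph pairs (build_tribes_graph pairs)

-- ===== LEMMAS AND PROOFS =====

-- index of the first tribe containing q (A's scanning order)
def pvFirstIdx (ts : List (PySem.Set Int)) (q : Int) : Option Nat :=
  ts.findIdx? (fun t => PySem.Set.contains t q)

-- invariant: B's dict maps each person to the index of the first tribe containing them
def pvInv (ts : List (PySem.Set Int)) (d : PySem.Dict Int Nat) : Prop :=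
  ∀ q, d.get? q = pvFirstIdx ts q

lemma pv_get?_foldl_insert_const (pair : List Int) (i : Nat) (d : PySem.Dict Int Nat) (q : Int) :
    (pair.foldl (fun d p => d.insert p i) d).get? q = if q ∈ pair then some i else d.get? q := by
  induction pair generalizing d with
  | nil => simp
  | cons p rest ih =>
    simp only [List.foldl_cons, ih, PySem.Dict.get?_insert, List.mem_cons]
    by_cases hq : q ∈ rest
    · simp [hq]
    · by_cases hp : q = p
      · simp [hp]
      · simp [hq, hp]

lemma pv_min?_map_succ (l : List Nat) : (l.map (· + 1)).min? = l.min?.map (· + 1) := by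
  induction l with
  | nil => simp
  | cons x xs ih =>
    rw [List.map_cons, List.min?_cons, List.min?_cons, ih]
    cases xs.min? with
    | none => simp
    | some m => simp [Option.elim]

lemma pv_hits_eq (pair : List Int) (ts : List (PySem.Set Int)) (d : PySem.Dict Int Nat)
    (h : pvInv ts d) :
    (pair.filter (fun p => d.contains p)).map (fun p => d.getD p 0)
      = pair.filterMap (pvFirstIdx ts) := by
  induction pair with
  | nil => simp
  | cons p rest ih =>
    have hc : d.contains p = (pvFirstIdx ts p).isSome := by
      rw [PySem.Dict.contains_eq_isSome_get?, h p]
    have hg : d.getD p 0 = (pvFirstIdx ts p).getD 0 := by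
      rw [PySem.Dict.getD_eq_get?_getD, h p]
    cases hfp : pvFirstIdx ts p with
    | none =>
      simp only [List.filter_cons, hc, hfp, Option.isSome_none, List.filterMap_cons]
      simpa using ih
    | some j =>
      have hgj : d.getD p 0 = j := by rw [hg, hfp]; rfl
      simp only [List.filter_cons, hc, hfp, Option.isSome_some, if_true, List.map_cons,
        List.filterMap_cons]
      simpa [hgj] using ih

lemma pv_findIdx_any_eq_min (ts : List (PySem.Set Int)) (pair : List Int) :
    ts.findIdx? (fun t => pvAnyIn pair t) = (pair.filterMap (pvFirstIdx ts)).min? := by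
  induction ts with
  | nil =>
    have : pair.filterMap (pvFirstIdx []) = [] := by
      simp [pvFirstIdx]
    simp [this]
  | cons t ts ih =>
    rw [List.findIdx?_cons]
    by_cases h : pvAnyIn pair t = true
    · rw [if_pos h]
      obtain ⟨p0, hp0mem, hp0⟩ := List.any_eq_true.mp h
      symm
      rw [List.min?_eq_some_iff]
      refine ⟨?_, fun b _ => Nat.zero_le b⟩
      exact List.mem_filterMap.mpr ⟨p0, hp0mem,
        by simp [pvFirstIdx, List.findIdx?_cons, (PySem.Set.contains_iff t p0).mp hp0]⟩
    · rw [if_neg h]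
      have hall : ∀ p ∈ pair, p ∉ t := by
        intro p hp hmem
        exact h (List.any_eq_true.mpr ⟨p, hp, (PySem.Set.contains_iff t p).mpr hmem⟩)
      have hmap : pair.filterMap (pvFirstIdx (t :: ts))
          = (pair.filterMap (pvFirstIdx ts)).map (· + 1) := by
        rw [List.map_filterMap]
        apply List.filterMap_congr
        intro p hp
        simp [pvFirstIdx, List.findIdx?_cons, hall p hp]
      rw [hmap, pv_min?_map_succ, ih]

lemma pv_firstIdx_set (ts : List (PySem.Set Int)) (i : Nat) (t' : PySem.Set Int) (q : Int)
    (h : ∀ hi : i < ts.length, PySem.Set.contains t' q = PySem.Set.contains ts[i] q) :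
    pvFirstIdx (ts.set i t') q = pvFirstIdx ts q := by
  induction ts generalizing i with
  | nil => simp
  | cons t ts ih =>
    cases i with
    | zero =>
      have h0 := h (by simp)
      simp only [List.getElem_cons_zero] at h0
      simp only [List.set_cons_zero, pvFirstIdx, List.findIdx?_cons, h0]
    | succ n =>
      have hrec := ih n (fun hn => by simpa using h (by simpa using Nat.succ_lt_succ hn))
      simp only [pvFirstIdx] at hrec
      simp only [List.set_cons_succ, pvFirstIdx, List.findIdx?_cons, hrec]

lemma pv_aMerge_eq (pair : List Int) (ts : List (PySem.Set Int)) :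
    pvAMerge pair ts =
      match ts.findIdx? (fun t => pvAnyIn pair t) with
      | some i => (ts.set i (PySem.Set.update (ts.getD i []) pair), true)
      | none => (ts, false) := by
  induction ts with
  | nil => simp [pvAMerge]
  | cons t ts ih =>
    rw [List.findIdx?_cons]
    by_cases h : pvAnyIn pair t = true
    · simp [pvAMerge, h, List.getD]
    · simp only [pvAMerge, h, if_neg, Bool.false_eq_true, not_false_eq_true, ih]
      cases hidx : ts.findIdx? (fun t => pvAnyIn pair t) with
      | none => simp
      | some i => simp [List.getD]

lemma pv_step_eq (ts : List (PySem.Set Int)) (d : PySem.Dict Int Nat) (pair : List Int)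
    (h : pvInv ts d) :
    (let r := pvAMerge pair ts;
      if r.2 then r.1 else r.1 ++ [PySem.Set.ofList pair]) = (pvBStep (ts, d) pair).1
    ∧ pvInv (pvBStep (ts, d) pair).1 (pvBStep (ts, d) pair).2 := by
  have hhits : (pair.filter (fun p => d.contains p)).map (fun p => d.getD p 0)
      = pair.filterMap (pvFirstIdx ts) := pv_hits_eq pair ts d h
  have hmin : ts.findIdx? (fun t => pvAnyIn pair t) = (pair.filterMap (pvFirstIdx ts)).min? :=
    pv_findIdx_any_eq_min ts pair
  rw [pv_aMerge_eq]
  unfold pvBStep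
  simp only [hhits]
  cases hidx : (pair.filterMap (pvFirstIdx ts)).min? with
  | some i =>
    rw [hmin, hidx]
    obtain ⟨hi, hsat, hbefore⟩ := List.findIdx?_eq_some_iff_getElem.mp (hmin.symm ▸ hidx)
    refine ⟨rfl, ?_⟩
    intro q
    simp only [pv_get?_foldl_insert_const]
    by_cases hq : q ∈ pair
    · rw [if_pos hq]
      symm
      apply List.findIdx?_eq_some_iff_getElem.mpr
      refine ⟨by simpa using hi, ?_, ?_⟩
      · rw [List.getElem_set (by simpa using hi), if_pos rfl]
        exact PySem.Set.contains_iff _ _ |>.mpr ((PySem.Set.mem_update _ _ _).mpr (Or.inr hq))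
      · intro j hji
        rw [List.getElem_set]
        rw [if_neg (by omega)]
        intro hcon
        exact hbefore j hji (by
          simp only [pvAnyIn, List.any_eq_true]
          exact ⟨q, hq, hcon⟩)
    · rw [if_neg hq]
      rw [pv_firstIdx_set ts i _ q (fun hi' => by
        rw [List.getD_eq_getElem ts [] hi']
        have hiff : ((PySem.Set.update ts[i] pair).contains q = true) ↔ (ts[i].contains q = true) := by
          rw [PySem.Set.contains_iff, PySem.Set.contains_iff, PySem.Set.mem_update]
          simp [hq]
        exact Bool.eq_iff_iff.mpr hiff)]
      exact h q
  | none =>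
    rw [hmin, hidx]
    have hnone : ∀ p ∈ pair, pvFirstIdx ts p = none := List.filterMap_eq_nil_iff.mp
      (by
        cases hfm : pair.filterMap (pvFirstIdx ts) with
        | nil => rfl
        | cons a l => rw [hfm] at hidx; simp [List.min?_cons] at hidx)
    refine ⟨rfl, ?_⟩
    intro q
    simp only [pv_get?_foldl_insert_const]
    by_cases hq : q ∈ pair
    · rw [if_pos hq]
      unfold pvFirstIdx
      rw [List.findIdx?_append]
      have h1 : ts.findIdx? (fun t => PySem.Set.contains t q) = none := hnone q hq
      have h2 : [PySem.Set.ofList pair].findIdx? (fun t => PySem.Set.contains t q) = some 0 := by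
        rw [List.findIdx?_cons]
        simp [hq]
      rw [h1, h2]
      simp
    · rw [if_neg hq]
      unfold pvFirstIdx
      rw [List.findIdx?_append]
      have h2 : [PySem.Set.ofList pair].findIdx? (fun t => PySem.Set.contains t q) = none := by
        rw [List.findIdx?_cons]
        simp [hq]
      rw [h2, h q]
      simp [pvFirstIdx]

lemma pv_loop (rest : List (List Int)) :
    ∀ (ts : List (PySem.Set Int)) (d : PySem.Dict Int Nat), pvInv ts d →
    rest.foldl (fun tribes pair =>
        let r := pvAMerge pair tribes
        if r.2 then r.1 else r.1 ++ [PySem.Set.ofList pair]) ts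
      = (rest.foldl pvBStep (ts, d)).1
    ∧ pvInv (rest.foldl pvBStep (ts, d)).1 (rest.foldl pvBStep (ts, d)).2 := by
  induction rest with
  | nil => exact fun ts d h => ⟨rfl, h⟩
  | cons pair rest ih =>
    intro ts d h
    obtain ⟨heq, hinv⟩ := pv_step_eq ts d pair h
    simp only [List.foldl_cons]
    rw [heq]
    have := ih (pvBStep (ts, d) pair).1 (pvBStep (ts, d) pair).2 hinv
    simpa using this

lemma pv_init_inv (p0 : List Int) :
    pvInv [PySem.Set.ofList p0] (p0.foldl (fun d p => d.insert p (0 : Nat)) PySem.Dict.empty) := by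
  intro q
  rw [pv_get?_foldl_insert_const]
  unfold pvFirstIdx
  rw [List.findIdx?_cons]
  by_cases hq : q ∈ p0
  · simp [hq]
  · simp [hq]

-- ===== VERDICT (by name: the statement is the Claim_ definition above) =====
theorem build_tribes_graph_spec : Claim_equal_build_tribes_graph := by
  intro pairs _ hpre
  unfold Spec_build_tribes_graph
  match pairs with
  | [] => exact absurd rfl hpre
  | p0 :: rest =>
    unfold build_tribes_graph build_tribes_graph_alt
    exact (pv_loop rest [PySem.Set.ofList p0] _ (pv_init_inv p0)).1
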